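-- pv_equiv track=rewrite | github.com/d-molchanov/jiht_staff_parser | staff_processor.py | process_internal_phone_field
-- ===== SOURCE A (Python) =====
-- def process_internal_phone_field(phone_number: str) -> str:
--     phone_number = phone_number.strip()
--     phone_number = phone_number.replace('-', '')
--     phone_number = phone_number.replace(' ', ',')
--     phone_number = phone_number.replace('/', ',')
--     phone_number = phone_number.replace('.', '')
--     phone_numbers = [phone for phone in phone_number.split(',') if phone.isdecimal()]
--     return [f'0{phone}' if len(phone) == 3 else phone for phone in phone_numbers]
-- ===== SOURCE B (Python) =====
-- def process_internal_phone_field(phone_number: str) -> str: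
--     tokens = []
--     buf = []
--     for ch in phone_number.strip():
--         if ch in ' /,':          # delimiters: flush current token
--             tokens.append(''.join(buf))
--             buf = []
--         elif ch in '-.':         # characters deleted outright
--             pass
--         else:
--             buf.append(ch)
--     tokens.append(''.join(buf))
--     return ['0' + t if len(t) == 3 else t for t in tokens if t.isdecimal()]
-- ===== Notes on version B (the rewrite author's own statement) =====
-- stated objective: alternative
-- what changed: Replaced the four character-replace passes plus split plus filter comprehension by a single tokenizing pass over the stripped string that flushes the current buffer at space, slash and comma, skips hyphen and dot, then filters the collected tokens by isdecimal and zero-prefixes length-3 ones.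
import Mathlib
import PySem

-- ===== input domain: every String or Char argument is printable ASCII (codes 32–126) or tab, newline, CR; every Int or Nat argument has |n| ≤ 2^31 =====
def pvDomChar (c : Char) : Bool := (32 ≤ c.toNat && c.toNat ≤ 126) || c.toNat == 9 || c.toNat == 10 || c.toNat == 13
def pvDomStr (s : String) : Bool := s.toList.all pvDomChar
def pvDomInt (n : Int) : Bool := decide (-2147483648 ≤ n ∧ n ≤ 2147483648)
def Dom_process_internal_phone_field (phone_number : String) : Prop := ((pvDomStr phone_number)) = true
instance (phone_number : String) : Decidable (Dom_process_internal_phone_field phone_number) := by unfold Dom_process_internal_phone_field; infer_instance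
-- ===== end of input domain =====

-- B fuses A's four replace passes + split + filter into one tokenizing pass over the stripped string (alternative decomposition, same asymptotic cost).


-- ===== PORT A =====
-- isdecimal is ported as PySem.Chars.strIsdigit: exact on the ASCII domain (both mean nonempty ∧ all chars '0'..'9').
def process_internal_phone_field (phone_number : String) : List String :=
  let cs0 := PySem.Chars.strip phone_number.toList
  let cs1 := PySem.Chars.replace cs0 ['-'] []
  let cs2 := PySem.Chars.replace cs1 [' '] [',']
  let cs3 := PySem.Chars.replace cs2 ['/'] [',']
  let cs4 := PySem.Chars.replace cs3 ['.'] []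
  let phone_numbers := (PySem.Chars.splitOn cs4 [',']).filter PySem.Chars.strIsdigit
  phone_numbers.map (fun t => String.ofList (if t.length = 3 then '0' :: t else t))

-- ===== PORT B =====
-- one step of B's loop over the stripped characters: state = (finished tokens, current buffer)
def pvStep (st : List (List Char) × List Char) (c : Char) : List (List Char) × List Char :=
  if c = ' ' ∨ c = '/' ∨ c = ',' then (st.1 ++ [st.2], [])
  else if c = '-' ∨ c = '.' then st
  else (st.1, st.2 ++ [c])

def process_internal_phone_field_alt (phone_number : String) : List String :=
  let st := (PySem.Chars.strip phone_number.toList).foldl pvStep ([], [])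
  let tokens := st.1 ++ [st.2]
  (tokens.filter PySem.Chars.strIsdigit).map
    (fun t => String.ofList (if t.length = 3 then '0' :: t else t))

-- ===== PRECONDITION & SPEC =====
def Spec_process_internal_phone_field (phone_number : String) (out : List String) : Prop := out = process_internal_phone_field_alt phone_number
instance (phone_number : String) (out : List String) : Decidable (Spec_process_internal_phone_field phone_number out) := by unfold Spec_process_internal_phone_field; infer_instance

-- ===== CLAIM (what is proved, stated in full; the proofs are below) =====
def Claim_equal_process_internal_phone_field : Prop := ∀ (phone_number : String), Dom_process_internal_phone_field phone_number → Spec_process_internal_phone_field phone_number (process_internal_phone_field phone_number)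

-- ===== LEMMAS AND PROOFS =====

-- replace with a single-char `old` and empty `new` deletes that character
theorem replace_single_del (cs : List Char) (a : Char) :
    PySem.Chars.replace cs [a] [] = cs.filter (· ≠ a) := by
  have go : ∀ (l acc : List Char) (fuel : Nat), l.length ≤ fuel →
      PySem.Chars.replace.go [a] [] fuel l acc = acc.reverse ++ l.filter (· ≠ a) := by
    intro l
    induction l with
    | nil => intro acc fuel _; cases fuel <;> simp [PySem.Chars.replace.go]
    | cons c t ih =>
      intro acc fuel hf
      cases fuel with
      | zero => simp at hf
      | succ n =>
        simp only [PySem.Chars.replace.go, List.filter]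
        by_cases hc : c = a
        · have h1 : ([a].isPrefixOf (c :: t)) = true := by simp [List.isPrefixOf, hc]
          rw [h1, if_pos rfl,
              show List.drop [a].length (c :: t) = t from rfl,
              show ([] : List Char).reverse ++ acc = acc from by simp,
              ih acc n (by simpa using hf)]
          simp [hc]
        · have hca : ¬ a = c := fun h => hc h.symm
          have h1 : ([a].isPrefixOf (c :: t)) = false := by simp [List.isPrefixOf, hca]
          rw [h1]
          simp only [Bool.false_eq_true, if_false]
          rw [ih (c :: acc) n (by simpa using hf)]
          simp [hc]
  simp [PySem.Chars.replace, go cs [] cs.length le_rfl]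

-- replace with single-char `old` and single-char `new` is a map
theorem replace_single_map (cs : List Char) (a b : Char) :
    PySem.Chars.replace cs [a] [b] = cs.map (fun x => if x = a then b else x) := by
  have go : ∀ (l acc : List Char) (fuel : Nat), l.length ≤ fuel →
      PySem.Chars.replace.go [a] [b] fuel l acc
        = acc.reverse ++ l.map (fun x => if x = a then b else x) := by
    intro l
    induction l with
    | nil => intro acc fuel _; cases fuel <;> simp [PySem.Chars.replace.go]
    | cons c t ih =>
      intro acc fuel hf
      cases fuel with
      | zero => simp at hf
      | succ n =>
        simp only [PySem.Chars.replace.go, List.map]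
        by_cases hc : c = a
        · have h1 : ([a].isPrefixOf (c :: t)) = true := by simp [List.isPrefixOf, hc]
          rw [h1, if_pos rfl,
              show List.drop [a].length (c :: t) = t from rfl,
              show [b].reverse ++ acc = b :: acc from by simp,
              ih (b :: acc) n (by simpa using hf)]
          simp [hc]
        · have hca : ¬ a = c := fun h => hc h.symm
          have : ([a].isPrefixOf (c :: t)) = false := by simp [List.isPrefixOf, hca]
          simp only [this, Bool.false_eq_true, if_false]
          rw [ih (c :: acc) n (by simpa using hf)]
          simp [hc]
  simp [PySem.Chars.replace, go cs [] cs.length le_rfl]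

-- structural form of splitting on a single comma (fuel removed)
def pvSplit (l : List Char) (cur : List Char) (acc : List (List Char)) : List (List Char) :=
  match l with
  | [] => (cur.reverse :: acc).reverse
  | c :: t => if c = ',' then pvSplit t [] (cur.reverse :: acc) else pvSplit t (c :: cur) acc

theorem splitOn_go_eq_pvSplit (l : List Char) :
    ∀ (cur : List Char) (acc : List (List Char)) (fuel : Nat), l.length ≤ fuel →
      PySem.Chars.splitOn.go [','] fuel l cur acc = pvSplit l cur acc := by
  induction l with
  | nil => intro cur acc fuel _; cases fuel <;> simp [PySem.Chars.splitOn.go, pvSplit]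
  | cons c t ih =>
    intro cur acc fuel hf
    cases fuel with
    | zero => simp at hf
    | succ n =>
      simp only [PySem.Chars.splitOn.go, pvSplit]
      by_cases hc : c = ','
      · have : ([','].isPrefixOf (c :: t)) = true := by simp [List.isPrefixOf, hc]
        rw [this, if_pos rfl, show List.drop [','].length (c :: t) = t from rfl]
        simp only [hc]
        exact ih [] (cur.reverse :: acc) n (by simpa using hf)
      · have hca : ¬ ',' = c := fun h => hc h.symm
        have : ([','].isPrefixOf (c :: t)) = false := by simp [List.isPrefixOf, hca]
        simp only [this, Bool.false_eq_true, if_false, hc]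
        exact ih (c :: cur) acc n (by simpa using hf)

-- A's transform of the stripped characters before splitting
def pvTransform (cs : List Char) : List Char :=
  (((cs.filter (· ≠ '-')).map (fun x => if x = ' ' then ',' else x)).map
      (fun x => if x = '/' then ',' else x)).filter (· ≠ '.')

-- the heart: splitting A's transformed string = running B's one-pass tokenizer
theorem pvSplit_transform (cs : List Char) :
    ∀ (toks : List (List Char)) (buf : List Char),
      pvSplit (pvTransform cs) buf.reverse toks.reverse
        = (cs.foldl pvStep (toks, buf)).1 ++ [(cs.foldl pvStep (toks, buf)).2] := by
  induction cs with
  | nil =>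
    intro toks buf
    simp [pvTransform, pvSplit]
  | cons c t ih =>
    intro toks buf
    simp only [List.foldl]
    by_cases h1 : c = ' ' ∨ c = '/' ∨ c = ','
    · have hne : c ≠ '-' ∧ c ≠ '.' := by rcases h1 with h | h | h <;> simp [h]
      have hstep : pvStep (toks, buf) c = (toks ++ [buf], []) := by
        simp [pvStep, h1]
      have htr : pvTransform (c :: t) = ',' :: pvTransform t := by
        rcases h1 with h | h | h <;> simp [pvTransform, h]
      rw [hstep, htr]
      have := ih (toks ++ [buf]) []
      simpa [pvSplit] using this
    · by_cases h2 : c = '-' ∨ c = '.'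
      · have hstep : pvStep (toks, buf) c = (toks, buf) := by
          simp [pvStep, h1, h2]
        have htr : pvTransform (c :: t) = pvTransform t := by
          rcases h2 with h | h <;> simp [pvTransform, h]
        rw [hstep, htr]; exact ih toks buf
      · push Not at h1 h2
        have hstep : pvStep (toks, buf) c = (toks, buf ++ [c]) := by
          simp [pvStep, h1.1, h1.2.1, h1.2.2, h2.1, h2.2]
        have htr : pvTransform (c :: t) = c :: pvTransform t := by
          simp [pvTransform, h1.1, h1.2.1, h2.1, h2.2]
        rw [hstep, htr]
        have := ih toks (buf ++ [c])
        simpa [pvSplit, h1.2.2] using this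

-- ===== VERDICT (by name: the statement is the Claim_ definition above) =====
theorem process_internal_phone_field_spec : Claim_equal_process_internal_phone_field := by
  intro s _
  unfold Spec_process_internal_phone_field process_internal_phone_field process_internal_phone_field_alt
  simp only [replace_single_del, replace_single_map]
  have h1 : PySem.Chars.splitOn (pvTransform (PySem.Chars.strip s.toList)) [',']
      = (((PySem.Chars.strip s.toList).foldl pvStep ([], [])).1
          ++ [((PySem.Chars.strip s.toList).foldl pvStep ([], [])).2]) := by
    rw [PySem.Chars.splitOn,
      splitOn_go_eq_pvSplit _ _ _ _ (Nat.le_succ _)]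
    simpa using pvSplit_transform (PySem.Chars.strip s.toList) [] []
  have h2 : List.filter (fun x => decide (x ≠ '.'))
        (List.map (fun x => if x = '/' then ',' else x)
          (List.map (fun x => if x = ' ' then ',' else x)
            (List.filter (fun x => decide (x ≠ '-')) (PySem.Chars.strip s.toList))))
      = pvTransform (PySem.Chars.strip s.toList) := rfl
  rw [h2, h1]
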